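-- pv_equiv track=rewrite | github.com/rdgonzaga/real-time-audio-streaming-over-ip | src/audio.py | _linear2ulaw_sample
-- ===== SOURCE A (Python) =====
-- _MU_LAW_BIAS = 0x84
--
-- _MU_LAW_CLIP = 32635
--
-- def _linear2ulaw_sample(sample: int) -> int:
-- 	"""encode one int16 sample to G.711 mu-law byte."""
-- 	s = int(sample)
-- 	sign = 0
-- 	if s < 0:
-- 		s = -s
-- 		sign = 0x80
-- 	if s > _MU_LAW_CLIP:
-- 		s = _MU_LAW_CLIP
-- 	s += _MU_LAW_BIAS
--
-- 	exponent = 7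
-- 	exp_mask = 0x4000
-- 	while exponent > 0 and (s & exp_mask) == 0:
-- 		exponent -= 1
-- 		exp_mask >>= 1
--
-- 	mantissa = (s >> (exponent + 3)) & 0x0F
-- 	ulaw = ~(sign | (exponent << 4) | mantissa) & 0xFF
-- 	return ulaw
-- ===== SOURCE B (Python) =====
-- def _linear2ulaw_sample(sample: int) -> int:
-- 	"""encode one int16 sample to G.711 mu-law byte (closed-form, no bit-search loop)."""
-- 	s = int(sample)
-- 	sign = 128 if s < 0 else 0
-- 	s = min(abs(s), 32635) + 132
-- 	exponent = s.bit_length() - 8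
-- 	mantissa = (s // (1 << (exponent + 3))) % 16
-- 	return 255 - (sign + 16 * exponent + mantissa)
-- ===== Notes on version B (the rewrite author's own statement) =====
-- stated objective: alternative
-- what changed: Replaces the while-loop bit search and the bitwise assembly (shift/or/and/not) by a closed-form exponent from s.bit_length() and pure integer arithmetic: mantissa via floor-division and modulo, and the final byte by subtracting the packed sign/exponent/mantissa sum from the all-ones byte.
import Mathlib
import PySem

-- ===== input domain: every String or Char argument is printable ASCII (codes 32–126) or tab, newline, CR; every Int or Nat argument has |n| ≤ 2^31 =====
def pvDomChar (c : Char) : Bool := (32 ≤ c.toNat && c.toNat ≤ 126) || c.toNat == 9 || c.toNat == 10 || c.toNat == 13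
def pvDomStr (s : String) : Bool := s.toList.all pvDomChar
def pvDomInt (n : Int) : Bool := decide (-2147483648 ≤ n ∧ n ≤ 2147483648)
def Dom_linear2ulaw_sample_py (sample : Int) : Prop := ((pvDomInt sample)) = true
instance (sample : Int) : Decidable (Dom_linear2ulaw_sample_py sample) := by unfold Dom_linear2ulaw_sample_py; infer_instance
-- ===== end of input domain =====

-- B replaces A's while-loop bit search by a closed-form exponent from bit_length and pure
-- arithmetic (no bitwise ops); objective: simpler/alternative, not measured faster.

-- ===== PORT A =====
-- the while loop: while exponent > 0 and (s & exp_mask) == 0: exponent -= 1; exp_mask >>= 1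
def muLoop (s : Int) : Nat → Int → Int
  | 0, _ => 0
  | (e+1), mask =>
      if PySem.Int.band s mask == 0 then muLoop s e (mask >>> (1:Nat)) else ((e+1 : Nat) : Int)

def linear2ulaw_sample_py (sample : Int) : Int :=
  let s := sample
  -- if s < 0: s = -s; sign = 0x80  (two ifs on the same condition)
  let sign : Int := if s < 0 then 0x80 else 0
  let s : Int := if s < 0 then -s else s
  let s : Int := if s > 32635 then 32635 else s
  let s := s + 0x84
  let exponent := muLoop s 7 0x4000
  -- exponent ∈ [0,7] always, so the Python shift amount exponent+3 is the Nat (exponent+3).toNat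
  let mantissa := PySem.Int.band (s >>> (exponent + 3).toNat) 0x0F
  PySem.Int.band (Int.not (PySem.Int.bor (PySem.Int.bor sign (exponent <<< (4 : Nat))) mantissa)) 0xFF

-- ===== PORT B =====
def linear2ulaw_sample_py_alt (sample : Int) : Int :=
  let s := sample
  let sign : Int := if s < 0 then 128 else 0
  let s : Int := min |s| 32635 + 132
  let exponent : Int := (PySem.Int.bitLength s : Int) - 8
  -- here s ≥ 132, so bit_length ≥ 8 and the Python shift amount exponent+3 is (exponent+3).toNat
  let mantissa : Int := PySem.Int.mod (PySem.Int.floordiv s ((1 : Int) <<< (exponent + 3).toNat)) 16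
  255 - (sign + 16 * exponent + mantissa)

-- ===== PRECONDITION & SPEC =====
def Spec_linear2ulaw_sample_py (sample : Int) (out : Int) : Prop := out = linear2ulaw_sample_py_alt sample
instance (sample : Int) (out : Int) : Decidable (Spec_linear2ulaw_sample_py sample out) := by unfold Spec_linear2ulaw_sample_py; infer_instance

-- ===== CLAIM (what is proved, stated in full; the proofs are below) =====
def Claim_equal_linear2ulaw_sample_py : Prop := ∀ (sample : Int), Dom_linear2ulaw_sample_py sample → Spec_linear2ulaw_sample_py sample (linear2ulaw_sample_py sample)

-- ===== LEMMAS AND PROOFS =====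

lemma natCast_shiftRight (m j : Nat) : ((m : Int) >>> j) = ((m >>> j : Nat) : Int) := rfl

lemma band_natCast_pow_eq_zero (n j : Nat) (h : n < 2 ^ j) :
    PySem.Int.band (n : Int) ((2 ^ j : Nat) : Int) = 0 := by
  rw [PySem.Int.band_natCast, Nat.and_two_pow, Nat.testBit_lt_two_pow h]
  simp

lemma band_natCast_pow_ne_zero (n j : Nat) (h1 : 2 ^ j ≤ n) (h2 : n < 2 ^ (j + 1)) :
    PySem.Int.band (n : Int) ((2 ^ j : Nat) : Int) ≠ 0 := by
  rw [PySem.Int.band_natCast, Nat.and_two_pow]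
  have hp : (0:Nat) < 2 ^ j := pow_pos (by norm_num : (0:ℕ) < 2) j
  have ht : n.testBit j = true := by
    rw [Nat.testBit_eq_decide_div_mod_eq]
    have hd : n / 2 ^ j = 1 := by
      have h1' : 1 ≤ n / 2 ^ j := (Nat.le_div_iff_mul_le hp).2 (by omega)
      have h2' : n / 2 ^ j < 2 := (Nat.div_lt_iff_lt_mul hp).2 (by rw [Nat.pow_succ] at h2; omega)
      omega
    simp [hd]
  rw [ht]
  simp

-- the loop computes k - 7 where k is the index of the top set bit, as long as k ≤ e + 7
lemma muLoop_eval_aux (n k : Nat) (hk1 : 2 ^ k ≤ n) (hk2 : n < 2 ^ (k + 1)) (h7 : 7 ≤ k) :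
    ∀ e : Nat, k ≤ e + 7 → muLoop (n : Int) e ((2 ^ (e + 7) : Nat) : Int) = (k : Int) - 7 := by
  intro e
  induction e with
  | zero =>
      intro he
      have : k = 7 := le_antisymm he h7
      subst this
      simp [muLoop]
  | succ e ih =>
      intro he
      by_cases hk : k = e + 8
      · subst hk
        have hne := band_natCast_pow_ne_zero n (e + 8) (by omega) (by omega)
        show muLoop (n : Int) (e+1) ((2 ^ (e + 1 + 7) : Nat) : Int) = ((e + 8 : Nat) : Int) - 7
        have harg : (e + 1 + 7) = e + 8 := by omega
        rw [harg, muLoop]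
        have hcond : ¬ ((PySem.Int.band (n : Int) ((2 ^ (e + 8) : Nat) : Int) == 0) = true) := by
          simpa using hne
        rw [if_neg hcond]
        push_cast
        omega
      · have hklt : k ≤ e + 7 := by omega
        have hz := band_natCast_pow_eq_zero n (e + 8) (by
          calc n < 2 ^ (k + 1) := hk2
            _ ≤ 2 ^ (e + 8) := Nat.pow_le_pow_right (by norm_num) (by omega))
        show muLoop (n : Int) (e+1) ((2 ^ (e + 1 + 7) : Nat) : Int) = (k : Int) - 7
        have harg : (e + 1 + 7) = e + 8 := by omega
        rw [harg, muLoop]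
        have hmask : (((2 ^ (e + 8) : Nat) : Int) >>> (1:Nat)) = ((2 ^ (e + 7) : Nat) : Int) := by
          rw [natCast_shiftRight]
          congr 1
          rw [Nat.shiftRight_eq_div_pow]
          rw [pow_succ' (M := ℕ)]
          omega
        have hcond : ((PySem.Int.band (n : Int) ((2 ^ (e + 8) : Nat) : Int) == 0) = true) := by
          simpa using hz
        rw [if_pos hcond, hmask]
        exact ih hklt

-- the bit-field final formula, checked over the finite field ranges
lemma final_formula : ∀ b : Bool, ∀ e < 8, ∀ m < 16,
    PySem.Int.band (Int.not (PySem.Int.bor (PySem.Int.bor (if b then (128:Int) else 0) (((e : Nat) : Int) <<< (4 : Nat))) ((m : Nat) : Int))) 0xFF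
      = 255 - ((if b then (128:Int) else 0) + 16 * ((e : Nat) : Int) + ((m : Nat) : Int)) := by decide

lemma one_shiftLeft_int (j : Nat) : (1 : Int) <<< j = ((2 ^ j : Nat) : Int) := by
  show ((1 <<< j : Nat) : Int) = _
  rw [Nat.one_shiftLeft]

lemma and_fifteen (n : Nat) : n &&& 15 = n % 16 :=
  Nat.and_two_pow_sub_one_eq_mod n 4

-- the core equality, for s = ↑n with 132 ≤ n ≤ 32767 and sign ∈ {0, 128}
lemma core_eq (n : Nat) (h1 : 132 ≤ n) (h2 : n ≤ 32767) (b : Bool) :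
    PySem.Int.band (Int.not (PySem.Int.bor (PySem.Int.bor (if b then (128:Int) else 0)
        ((muLoop (n : Int) 7 0x4000) <<< (4 : Nat)))
        (PySem.Int.band ((n : Int) >>> ((muLoop (n : Int) 7 0x4000) + 3).toNat) 0x0F))) 0xFF
    = 255 - ((if b then (128:Int) else 0) + 16 * ((PySem.Int.bitLength (n : Int) : Int) - 8)
        + PySem.Int.mod (PySem.Int.floordiv (n : Int) ((1 : Int) <<< (((PySem.Int.bitLength (n : Int) : Int) - 8) + 3).toNat)) 16) := by
  have hn0 : ((n : Int)) ≠ 0 := by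
    simp; omega
  have hlt : n < 2 ^ PySem.Int.bitLength (n : Int) := by
    have := PySem.Int.lt_two_pow_bitLength (n : Int)
    simpa using this
  have hge : 2 ^ (PySem.Int.bitLength (n : Int) - 1) ≤ n := by
    have := PySem.Int.two_pow_bitLength_le (n : Int) hn0
    simpa using this
  set L := PySem.Int.bitLength (n : Int) with hLdef
  have hL8 : 8 ≤ L := by
    by_contra h
    have : L ≤ 7 := by omega
    have : (2:Nat) ^ L ≤ 2 ^ 7 := Nat.pow_le_pow_right (by norm_num) this
    omega
  have hL15 : L ≤ 15 := by
    by_contra h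
    have h15 : 15 ≤ L - 1 := by omega
    have : (2:Nat) ^ 15 ≤ 2 ^ (L - 1) := Nat.pow_le_pow_right (by norm_num) h15
    omega
  -- k = index of the top set bit
  have hk1 : 2 ^ (L - 1) ≤ n := hge
  have hk2 : n < 2 ^ ((L - 1) + 1) := by
    have : (L - 1) + 1 = L := by omega
    rw [this]; exact hlt
  have hloop : muLoop (n : Int) 7 0x4000 = ((L - 1 : Nat) : Int) - 7 := by
    have := muLoop_eval_aux n (L - 1) hk1 hk2 (by omega) 7 (by omega)
    have h14 : ((2 ^ (7 + 7) : Nat) : Int) = 0x4000 := by norm_num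
    rw [h14] at this
    exact this
  rw [hloop]
  -- shift amounts
  have htA : ((((L - 1 : Nat) : Int) - 7) + 3).toNat = L - 5 := by omega
  have hBexp : (PySem.Int.bitLength (n : Int) : Int) - 8 = ((L - 1 : Nat) : Int) - 7 := by
    rw [← hLdef]; omega
  rw [hBexp, htA]
  -- the A-side mantissa
  have hmA : PySem.Int.band ((n : Int) >>> (L - 5)) 0x0F = ((n / 2 ^ (L - 5) % 16 : Nat) : Int) := by
    rw [natCast_shiftRight]
    have : (0x0F : Int) = ((15 : Nat) : Int) := by norm_num
    rw [this, PySem.Int.band_natCast, Nat.shiftRight_eq_div_pow, and_fifteen]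
  rw [hmA]
  -- the B-side mantissa
  have hmB : PySem.Int.mod (PySem.Int.floordiv (n : Int) ((1 : Int) <<< (L - 5))) 16
      = ((n / 2 ^ (L - 5) % 16 : Nat) : Int) := by
    rw [one_shiftLeft_int, PySem.Int.floordiv_natCast]
    exact_mod_cast PySem.Int.mod_natCast (n / 2 ^ (L - 5)) 16
  rw [hmB]
  -- apply the finite-field formula with e = L - 8, m = the mantissa
  have hcast : ((L - 1 : Nat) : Int) - 7 = ((L - 8 : Nat) : Int) := by omega
  rw [hcast]
  exact final_formula b (L - 8) (by omega) (n / 2 ^ (L - 5) % 16) (Nat.mod_lt _ (by norm_num))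

-- ===== VERDICT (by name: the statement is the Claim_ definition above) =====
theorem linear2ulaw_sample_py_spec : Claim_equal_linear2ulaw_sample_py := by
  intro sample _
  unfold Spec_linear2ulaw_sample_py
  simp only [linear2ulaw_sample_py, linear2ulaw_sample_py_alt]
  have hs : (if (if sample < 0 then -sample else sample) > 32635 then (32635:Int)
        else (if sample < 0 then -sample else sample)) + 0x84
      = ((min sample.natAbs 32635 + 132 : Nat) : Int) := by
    rcases le_total sample.natAbs 32635 with h | h
    · rw [min_eq_left h]; split_ifs <;> omega
    · rw [min_eq_right h]; split_ifs <;> omega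
  have habs : |sample| = ((sample.natAbs : Nat) : Int) := Int.abs_eq_natAbs sample
  have hsB : min |sample| 32635 + 132 = ((min sample.natAbs 32635 + 132 : Nat) : Int) := by
    rw [habs]
    rcases le_total sample.natAbs 32635 with h | h
    · rw [min_eq_left h, min_eq_left (show ((sample.natAbs : Nat) : Int) ≤ 32635 by exact_mod_cast h)]
      push_cast
      try ring
    · rw [min_eq_right h, min_eq_right (show (32635 : Int) ≤ ((sample.natAbs : Nat) : Int) by exact_mod_cast h)]
      push_cast
      try ring
  rw [hs, hsB]
  have hb : (if sample < 0 then (0x80:Int) else 0) = (if decide (sample < 0) then (128:Int) else 0) := by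
    by_cases h : sample < 0 <;> simp [h]
  rw [hb]
  exact core_eq (min sample.natAbs 32635 + 132) (by omega) (by omega) (decide (sample < 0))
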